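-- pv_equiv track=rewrite | github.com/ldayton/Tongues | tongues/src/frontend/names.py | is_all_caps
-- ===== SOURCE A (Python) =====
-- def is_all_caps(name: str) -> bool:
--     """Check if name is ALL_CAPS (constant convention)."""
--     if len(name) == 0:
--         return False
--     i = 0
--     while i < len(name):
--         c = name[i]
--         if c != "_" and not c.isupper() and not c.isdigit():
--             return False
--         i += 1
--     # Must have at least one letter
--     j = 0
--     has_letter = False
--     while j < len(name):
--         if name[j].isupper():
--             has_letter = True
--             break
--         j += 1
--     return has_letter
-- ===== SOURCE B (Python) =====
-- _ALLOWED = frozenset("_0123456789ABCDEFGHIJKLMNOPQRSTUVWXYZ")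
-- _UPPER = frozenset("ABCDEFGHIJKLMNOPQRSTUVWXYZ")
--
--
-- def is_all_caps(name: str) -> bool:
--     """Check if name is ALL_CAPS (constant convention)."""
--     chars = set(name)
--     return chars <= _ALLOWED and not chars.isdisjoint(_UPPER)
-- ===== Notes on version B (the rewrite author's own statement) =====
-- stated objective: alternative
-- what changed: Replaced A's two index-driven per-character while loops by a set algorithm: build the set of distinct characters once, then one subset test against a frozenset of allowed characters (underscore, digits, uppercase letters) and one disjointness test against the uppercase letters; no per-character scan or early break remains.
import Mathlib
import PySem

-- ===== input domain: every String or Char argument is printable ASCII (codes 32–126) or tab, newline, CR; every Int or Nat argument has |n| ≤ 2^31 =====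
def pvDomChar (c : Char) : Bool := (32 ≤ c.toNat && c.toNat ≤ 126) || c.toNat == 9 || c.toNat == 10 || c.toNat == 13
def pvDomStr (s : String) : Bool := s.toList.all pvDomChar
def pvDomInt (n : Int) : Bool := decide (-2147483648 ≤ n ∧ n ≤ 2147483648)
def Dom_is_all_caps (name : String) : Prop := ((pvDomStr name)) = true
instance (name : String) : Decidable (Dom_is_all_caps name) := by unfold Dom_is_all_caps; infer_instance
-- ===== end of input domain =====

-- B replaces A's two index-driven while loops by a set algorithm: the set of distinct characters,
-- one subset test against the allowed characters and one disjointness test against the uppercase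
-- letters (exact on the ASCII domain); objective: alternative, same O(n) cost.


-- ===== PORT A =====
-- first while loop: return False on the first character that is not '_', uppercase or digit
def aValidLoop : List Char → Bool
  | [] => true
  | c :: cs =>
    if c != '_' && !PySem.Chars.isupper c && !PySem.Chars.isdigit c then false
    else aValidLoop cs

-- second while loop: has_letter search with break
def aLetterLoop : List Char → Bool
  | [] => false
  | c :: cs => if PySem.Chars.isupper c then true else aLetterLoop cs

def is_all_caps (name : String) : Bool :=
  if PySem.Str.len name == 0 then false
  else if aValidLoop name.toList then aLetterLoop name.toList
  else false

-- ===== PORT B =====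
-- the two frozenset constants of Source B
def allowedSet : PySem.Set Char := PySem.Set.ofList "_0123456789ABCDEFGHIJKLMNOPQRSTUVWXYZ".toList
def upperSet : PySem.Set Char := PySem.Set.ofList "ABCDEFGHIJKLMNOPQRSTUVWXYZ".toList

def is_all_caps_alt (name : String) : Bool :=
  let chars := PySem.Set.ofList name.toList
  PySem.Set.issubset chars allowedSet && !(PySem.Set.isdisjoint chars upperSet)

-- ===== PRECONDITION & SPEC =====
def Spec_is_all_caps (name : String) (out : Bool) : Prop := out = is_all_caps_alt name
instance (name : String) (out : Bool) : Decidable (Spec_is_all_caps name out) := by unfold Spec_is_all_caps; infer_instance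

-- ===== CLAIM =====
def Claim_equal_is_all_caps : Prop := ∀ (name : String), Dom_is_all_caps name → Spec_is_all_caps name (is_all_caps name)

-- ===== LEMMAS AND PROOFS =====

-- membership in a character list through the character codes
theorem char_mem_map_toNat (c : Char) (L : List Char) : c ∈ L ↔ c.toNat ∈ L.map Char.toNat :=
  ⟨fun h => List.mem_map_of_mem h, fun h => by
    obtain ⟨d, hd, he⟩ := List.mem_map.mp h
    exact (Char.ext (UInt32.toNat_inj.mp he)) ▸ hd⟩

-- pointwise: membership in the allowed frozenset is A's character test (both are ASCII ranges)
theorem mem_allowedSet (c : Char) :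
    c ∈ allowedSet ↔ (c == '_' || PySem.Chars.isupper c || PySem.Chars.isdigit c) = true := by
  have h1 : c ∈ allowedSet ↔ c.toNat ∈
      [95,48,49,50,51,52,53,54,55,56,57,65,66,67,68,69,70,71,72,73,74,75,76,77,78,79,80,
       81,82,83,84,85,86,87,88,89,90] := by
    simp only [allowedSet, PySem.Set.mem_ofList]
    rw [char_mem_map_toNat]
    have hmap : ("_0123456789ABCDEFGHIJKLMNOPQRSTUVWXYZ".toList.map Char.toNat) =
        [95,48,49,50,51,52,53,54,55,56,57,65,66,67,68,69,70,71,72,73,74,75,76,77,78,79,80,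
         81,82,83,84,85,86,87,88,89,90] := by decide
    rw [hmap]
  have h95 : c = '_' ↔ c.toNat = 95 :=
    ⟨fun h => h ▸ rfl, fun h => Char.ext (UInt32.toNat_inj.mp h)⟩
  have hA : ('A' ≤ c) ↔ 65 ≤ c.toNat := by
    rw [Char.le_def, UInt32.le_iff_toNat_le]; exact Iff.rfl
  have hZ : (c ≤ 'Z') ↔ c.toNat ≤ 90 := by
    rw [Char.le_def, UInt32.le_iff_toNat_le]; exact Iff.rfl
  have h0 : ('0' ≤ c) ↔ 48 ≤ c.toNat := by
    rw [Char.le_def, UInt32.le_iff_toNat_le]; exact Iff.rfl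
  have h9 : (c ≤ '9') ↔ c.toNat ≤ 57 := by
    rw [Char.le_def, UInt32.le_iff_toNat_le]; exact Iff.rfl
  rw [h1]
  simp only [List.mem_cons, List.not_mem_nil, or_false, Bool.or_eq_true, beq_iff_eq, h95,
    PySem.Chars.isupper, PySem.Chars.isdigit, Bool.and_eq_true, decide_eq_true_eq,
    hA, hZ, h0, h9]
  omega

-- pointwise: membership in the uppercase frozenset is A's has_letter test
theorem mem_upperSet (c : Char) :
    c ∈ upperSet ↔ PySem.Chars.isupper c = true := by
  have h1 : c ∈ upperSet ↔ c.toNat ∈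
      [65,66,67,68,69,70,71,72,73,74,75,76,77,78,79,80,81,82,83,84,85,86,87,88,89,90] := by
    simp only [upperSet, PySem.Set.mem_ofList]
    rw [char_mem_map_toNat]
    have hmap : ("ABCDEFGHIJKLMNOPQRSTUVWXYZ".toList.map Char.toNat) =
        [65,66,67,68,69,70,71,72,73,74,75,76,77,78,79,80,81,82,83,84,85,86,87,88,89,90] := by
      decide
    rw [hmap]
  have hA : ('A' ≤ c) ↔ 65 ≤ c.toNat := by
    rw [Char.le_def, UInt32.le_iff_toNat_le]; exact Iff.rfl
  have hZ : (c ≤ 'Z') ↔ c.toNat ≤ 90 := by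
    rw [Char.le_def, UInt32.le_iff_toNat_le]; exact Iff.rfl
  rw [h1]
  simp only [List.mem_cons, List.not_mem_nil, or_false, PySem.Chars.isupper,
    Bool.and_eq_true, decide_eq_true_eq, hA, hZ]
  omega

theorem aValidLoop_eq_all (cs : List Char) :
    aValidLoop cs = cs.all (fun c => c == '_' || PySem.Chars.isupper c || PySem.Chars.isdigit c) := by
  induction cs with
  | nil => rfl
  | cons c cs ih =>
    simp only [aValidLoop, List.all_cons, ih]
    cases hu : PySem.Chars.isupper c <;> cases hd : PySem.Chars.isdigit c <;>
      cases he : (c == '_') <;> simp [bne, he]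

theorem aLetterLoop_eq_any (cs : List Char) :
    aLetterLoop cs = cs.any (fun c => PySem.Chars.isupper c) := by
  induction cs with
  | nil => rfl
  | cons c cs ih =>
    rw [aLetterLoop, List.any_cons, ih]
    cases PySem.Chars.isupper c <;> simp

-- B's subset test over the distinct characters is A's validation pass over the string
theorem bSubset_eq_all (L : List Char) :
    PySem.Set.issubset (PySem.Set.ofList L) allowedSet =
      L.all (fun c => c == '_' || PySem.Chars.isupper c || PySem.Chars.isdigit c) := by
  rw [Bool.eq_iff_iff, PySem.Set.issubset_iff, List.all_eq_true]
  simp only [PySem.Set.mem_ofList]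
  exact ⟨fun h c hc => (mem_allowedSet c).mp (h c hc),
         fun h c hc => (mem_allowedSet c).mpr (h c hc)⟩

-- B's non-disjointness test over the distinct characters is A's has_letter search
theorem bDisjoint_eq_any (L : List Char) :
    (!(PySem.Set.isdisjoint (PySem.Set.ofList L) upperSet)) =
      L.any (fun c => PySem.Chars.isupper c) := by
  rw [Bool.eq_iff_iff, Bool.not_eq_true', ← Bool.not_eq_true, PySem.Set.isdisjoint_iff]
  simp only [PySem.Set.mem_ofList, List.any_eq_true]
  constructor
  · intro hd
    by_contra hno
    exact hd fun x hx hxu => hno ⟨x, hx, (mem_upperSet x).mp hxu⟩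
  · rintro ⟨x, hx, hq⟩ hall
    exact hall x hx ((mem_upperSet x).mpr hq)

-- key computation on the underlying character list
theorem key_list (L : List Char) :
    (if ((L.length : Int) == 0) = true then false
     else if aValidLoop L then aLetterLoop L else false) =
    (PySem.Set.issubset (PySem.Set.ofList L) allowedSet &&
      !(PySem.Set.isdisjoint (PySem.Set.ofList L) upperSet)) := by
  rw [bSubset_eq_all, bDisjoint_eq_any, aValidLoop_eq_all, aLetterLoop_eq_any]
  cases L with
  | nil => simp
  | cons c cs =>
    simp only [List.length_cons]
    rw [if_neg (by simp only [beq_iff_eq]; omega)]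
    cases h : (c :: cs).all (fun c => c == '_' || PySem.Chars.isupper c || PySem.Chars.isdigit c)
    · rw [if_neg (by simp), Bool.false_and]
    · rw [if_pos rfl, Bool.true_and]

-- ===== VERDICT =====
theorem is_all_caps_spec : Claim_equal_is_all_caps := by
  intro name _
  unfold Spec_is_all_caps is_all_caps is_all_caps_alt
  simp only [PySem.Str.len_eq]
  exact key_list name.toList
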